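-- pv_equiv track=rewrite | github.com/autosome-ru/ADASTRA-pipeline | scripts/FIGURES/fit_bias.py | get_window_up_2n
-- ===== SOURCE A (Python) =====
-- def get_window_up_2n(n, nonzero_dict, samples):
--     window = {}
--     current_cumulative_counts = 0
--     required_counts = 2 * n
--     for key in sorted(list(nonzero_dict.keys())):
--         if n <= key:
--             window[key] = nonzero_dict[key]
--             current_cumulative_counts += samples[key]
--         if current_cumulative_counts >= required_counts:
--             break
--     return window
-- ===== SOURCE B (Python) =====
-- def get_window_up_2n(n, nonzero_dict, samples):
--     # Prefix-table decomposition: build the cumulative-count table over the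
--     # sorted keys, locate the cutoff index, then build the window in one
--     # comprehension (instead of A's interleaved build-and-break loop).
--     skeys = sorted(nonzero_dict)
--     prefix = []
--     total = 0
--     for k in skeys:
--         total += samples[k] if n <= k else 0
--         prefix.append(total)
--     cut = next((i for i, c in enumerate(prefix) if c >= 2 * n), len(skeys) - 1)
--     return {k: nonzero_dict[k] for k in skeys[:cut + 1] if n <= k}
-- ===== Notes on version B (the rewrite author's own statement) =====
-- stated objective: alternative
-- what changed: A's single interleaved loop that builds the window, accumulates sample counts and breaks on crossing 2n is replaced by three separate passes: a prefix-sum table over the sorted keys, a search for the first index whose cumulative count reaches 2n, and a dict comprehension over the keys up to that cutoff filtered by key >= n.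
-- outside the precondition, e.g. on get_window_up_2n(1, {1: 5, 2: 7}, {1: 10}): A returns {1: 5}, B raises KeyError
import Mathlib
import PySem

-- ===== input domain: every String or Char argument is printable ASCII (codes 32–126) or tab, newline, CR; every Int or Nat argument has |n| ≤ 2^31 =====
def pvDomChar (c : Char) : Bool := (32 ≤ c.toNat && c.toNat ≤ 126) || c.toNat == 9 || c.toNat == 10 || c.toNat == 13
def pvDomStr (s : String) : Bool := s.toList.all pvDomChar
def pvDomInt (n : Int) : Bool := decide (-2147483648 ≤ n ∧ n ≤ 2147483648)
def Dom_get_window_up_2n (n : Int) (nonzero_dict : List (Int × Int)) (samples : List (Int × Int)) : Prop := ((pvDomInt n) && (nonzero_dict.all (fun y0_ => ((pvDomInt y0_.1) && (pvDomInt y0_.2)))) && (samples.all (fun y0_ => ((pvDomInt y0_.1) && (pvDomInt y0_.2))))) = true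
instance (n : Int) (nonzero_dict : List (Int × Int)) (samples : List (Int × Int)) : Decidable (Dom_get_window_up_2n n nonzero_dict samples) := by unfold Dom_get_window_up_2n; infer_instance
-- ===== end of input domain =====

-- B replaces A's interleaved build-and-break loop by a pref-sum table, a cutoff search
-- and a filtering comprehension (objective: alternative decomposition, same cost).


-- ===== PORT A =====
-- A's for-loop: window/cumulative accumulator, break as soon as cumulative ≥ 2n.
-- samples[key] is ported as getD (exact under Pre_, which guarantees the key is present).
def pvALoop (n : Int) (nz sm : PySem.Dict Int Int) (req : Int) :
    List Int → PySem.Dict Int Int → Int → PySem.Dict Int Int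
  | [], w, _ => w
  | k :: ks, w, cum =>
    if n ≤ k then
      let w' := w.insert k (nz.getD k 0)
      let cum' := cum + sm.getD k 0
      if req ≤ cum' then w' else pvALoop n nz sm req ks w' cum'
    else
      if req ≤ cum then w else pvALoop n nz sm req ks w cum

def get_window_up_2n (n : Int) (nonzero_dict : List (Int × Int)) (samples : List (Int × Int)) : List (Int × Int) :=
  let nz := PySem.Dict.ofList nonzero_dict
  let sm := PySem.Dict.ofList samples
  (pvALoop n nz sm (2 * n) (PySem.List.sorted nz.keys (fun x => x) false) PySem.Dict.empty 0).items

-- ===== PORT B =====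
-- Source B's pref-table loop (append becomes cons-building recursion over the same running total).
def pvPrefix (n : Int) (sm : PySem.Dict Int Int) : List Int → Int → List Int
  | [], _ => []
  | k :: ks, total =>
    let t := total + (if n ≤ k then sm.getD k 0 else 0)
    t :: pvPrefix n sm ks t

def get_window_up_2n_alt (n : Int) (nonzero_dict : List (Int × Int)) (samples : List (Int × Int)) : List (Int × Int) :=
  let nz := PySem.Dict.ofList nonzero_dict
  let sm := PySem.Dict.ofList samples
  let skeys := PySem.List.sorted nz.keys (fun x => x) false
  let pref := pvPrefix n sm skeys 0
  -- Source B: cut = next((i ... if c >= 2*n), len(skeys)-1); skeys[:cut+1] — ported as a Nat take-length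
  let cutTake : Nat := match List.findIdx? (fun c => decide (2 * n ≤ c)) pref with
    | some i => i + 1
    | none => skeys.length
  (((skeys.take cutTake).filter (fun k => decide (n ≤ k))).foldl
    (fun d k => d.insert k (nz.getD k 0)) PySem.Dict.empty).items

-- ===== PRECONDITION & SPEC =====
-- Pre_ excludes inputs where some key ≥ n of nonzero_dict is missing from samples:
-- there A raises KeyError unless the cumulative count reaches 2n before that key
-- (in which case A's partial window is an accident of the break point), while B's
-- whole-table pref pass always raises KeyError.
def Pre_get_window_up_2n (n : Int) (nonzero_dict : List (Int × Int)) (samples : List (Int × Int)) : Prop :=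
  ∀ p ∈ nonzero_dict, n ≤ p.1 → p.1 ∈ samples.map Prod.fst
instance (n : Int) (nonzero_dict : List (Int × Int)) (samples : List (Int × Int)) : Decidable (Pre_get_window_up_2n n nonzero_dict samples) := by unfold Pre_get_window_up_2n; infer_instance

def pvWitness_get_window_up_2n : Int × (List (Int × Int)) × (List (Int × Int)) :=
  (1, [(1, 5), (2, 7)], [(1, 10), (2, 1)])

def Spec_get_window_up_2n (n : Int) (nonzero_dict : List (Int × Int)) (samples : List (Int × Int)) (out : List (Int × Int)) : Prop := out = get_window_up_2n_alt n nonzero_dict samples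
instance (n : Int) (nonzero_dict : List (Int × Int)) (samples : List (Int × Int)) (out : List (Int × Int)) : Decidable (Spec_get_window_up_2n n nonzero_dict samples out) := by unfold Spec_get_window_up_2n; infer_instance

-- ===== CLAIM (what is proved, stated in full; the proofs are below) =====
def Claim_equal_get_window_up_2n : Prop := ∀ (n : Int) (nonzero_dict : List (Int × Int)) (samples : List (Int × Int)), Dom_get_window_up_2n n nonzero_dict samples → Pre_get_window_up_2n n nonzero_dict samples → Spec_get_window_up_2n n nonzero_dict samples (get_window_up_2n n nonzero_dict samples)

-- ===== LEMMAS AND PROOFS =====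

-- the cutoff as a take-length, generalized to an arbitrary starting total
def pvCutTake (req : Int) (pref : List Int) (dflt : Nat) : Nat :=
  match List.findIdx? (fun c => decide (req ≤ c)) pref with
  | some i => i + 1
  | none => dflt

theorem pvPrefix_length (n : Int) (sm : PySem.Dict Int Int) :
    ∀ (ks : List Int) (total : Int), (pvPrefix n sm ks total).length = ks.length := by
  intro ks
  induction ks with
  | nil => intro total; rfl
  | cons k ks ih => intro total; simp [pvPrefix, ih]

-- A's break loop equals: take up to the first pref-sum crossing req, filter by n ≤ key, fold-insert.
theorem pvALoop_eq (n : Int) (nz sm : PySem.Dict Int Int) (req : Int) :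
    ∀ (ks : List Int) (w : PySem.Dict Int Int) (cum : Int),
    pvALoop n nz sm req ks w cum =
      ((ks.take (pvCutTake req (pvPrefix n sm ks cum) ks.length)).filter
          (fun k => decide (n ≤ k))).foldl (fun d k => d.insert k (nz.getD k 0)) w := by
  intro ks
  induction ks with
  | nil => intro w cum; rfl
  | cons k ks ih =>
    intro w cum
    by_cases hk : n ≤ k
    · by_cases hbr : req ≤ cum + sm.getD k 0
      · simp [pvALoop, pvPrefix, pvCutTake, List.findIdx?_cons, hk, hbr, List.filter]
      · simp only [pvALoop, pvPrefix, pvCutTake, List.findIdx?_cons, hk, hbr, if_true, if_false,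
          decide_true, decide_false, if_pos, if_neg]
        rw [ih]
        simp [pvCutTake, pvPrefix_length]
        cases hfi : List.findIdx? (fun c => decide (req ≤ c)) (pvPrefix n sm ks (cum + sm.getD k 0)) with
        | none => simp [hfi, hk, hbr, List.filter]
        | some i => simp [hfi, hk, hbr, List.filter]
    · by_cases hbr : req ≤ cum
      · simp [pvALoop, pvPrefix, pvCutTake, List.findIdx?_cons, hk, hbr, List.filter]
      · simp only [pvALoop, pvPrefix, pvCutTake, List.findIdx?_cons, hk, hbr, if_true, if_false,
          decide_true, decide_false, if_pos, if_neg]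
        rw [ih]
        simp [pvCutTake, pvPrefix_length]
        cases hfi : List.findIdx? (fun c => decide (req ≤ c)) (pvPrefix n sm ks cum) with
        | none => simp [hfi, hk, hbr, List.filter]
        | some i => simp [hfi, hk, hbr, List.filter]

-- ===== VERDICT (by name: the statement is the Claim_ definition above) =====
theorem get_window_up_2n_spec : Claim_equal_get_window_up_2n := by
  intro n nonzero_dict samples _ _
  simp only [Spec_get_window_up_2n, get_window_up_2n, get_window_up_2n_alt]
  rw [pvALoop_eq]
  simp [pvCutTake]
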